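-- pv_equiv track=rewrite | github.com/mellody0/ai-newsletter | digest.py | find_source_article
-- ===== SOURCE A (Python) =====
-- def find_source_article(url: str, articles: list) -> dict:
--     """Match a curated story URL back to its original article dict."""
--     def normalise(u: str) -> str:
--         return u.rstrip("/").lower().split("?")[0]
--
--     target = normalise(url)
--     for a in articles:
--         if normalise(a["link"]) == target:
--             return a
--
--     # Fallback: substring match on the URL path
--     for a in articles:
--         norm = normalise(a["link"])
--         if target in norm or norm in target:
--             return a
--
--     return {}
-- ===== SOURCE B (Python) =====
-- def find_source_article(url: str, articles: list) -> dict: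
--     """Match a curated story URL back to its original article dict (single pass)."""
--     def normalise(u: str) -> str:
--         return u.rstrip("/").lower().split("?")[0]
--
--     target = normalise(url)
--     fallback = None
--     for a in articles:
--         norm = normalise(a["link"])
--         if norm == target:
--             return a
--         if fallback is None and (target in norm or norm in target):
--             fallback = a
--     return fallback if fallback is not None else {}
-- ===== Notes on version B (the rewrite author's own statement) =====
-- stated objective: alternative
-- what changed: Two sequential scans (exact-match pass, then substring-fallback pass) are fused into a single pass that returns an exact match immediately and records the first substring candidate, normalising each link once instead of twice.
import Mathlib
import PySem

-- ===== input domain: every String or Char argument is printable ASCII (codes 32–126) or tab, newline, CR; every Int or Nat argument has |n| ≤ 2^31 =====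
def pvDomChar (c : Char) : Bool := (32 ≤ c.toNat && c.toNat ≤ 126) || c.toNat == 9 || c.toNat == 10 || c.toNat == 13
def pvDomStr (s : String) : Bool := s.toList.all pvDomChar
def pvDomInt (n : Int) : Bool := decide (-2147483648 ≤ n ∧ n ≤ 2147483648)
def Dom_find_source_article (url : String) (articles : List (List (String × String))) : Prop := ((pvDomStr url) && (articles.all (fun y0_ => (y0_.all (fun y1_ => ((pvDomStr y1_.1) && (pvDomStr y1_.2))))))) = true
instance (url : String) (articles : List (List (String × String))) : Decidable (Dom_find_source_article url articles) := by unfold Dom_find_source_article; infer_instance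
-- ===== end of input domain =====

-- B fuses A's two scans (exact-match pass, then substring-fallback pass) into one pass that
-- returns an exact match at once and records the first substring candidate; same cost class.


-- ===== PORT A =====
-- u.rstrip("/") ported by hand (PySem has no chars-argument rstrip): drop trailing '/' characters — exact.
def pvNormalise (u : String) : String :=
  (((PySem.Str.split?
      (PySem.Str.lower (String.mk ((u.toList.reverse.dropWhile (· == '/')).reverse)))
      "?").getD []).headD "")

-- first loop of A: return the first article whose normalised link equals target
def pvFindExact (target : String) : List (List (String × String)) → Option (List (String × String))
  | [] => none
  | a :: rest =>
      if pvNormalise (PySem.Dict.getD (PySem.Dict.mk a) "link" "") == target then some a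
      else pvFindExact target rest

-- second loop of A: first article whose normalised link is a sub/superstring of target
def pvFindSub (target : String) : List (List (String × String)) → Option (List (String × String))
  | [] => none
  | a :: rest =>
      let norm := pvNormalise (PySem.Dict.getD (PySem.Dict.mk a) "link" "")
      if PySem.Str.isIn target norm || PySem.Str.isIn norm target then some a
      else pvFindSub target rest

def find_source_article (url : String) (articles : List (List (String × String))) : List (String × String) :=
  let target := pvNormalise url
  match pvFindExact target articles with
  | some a => a
  | none =>
    match pvFindSub target articles with
    | some a => a
    | none => []

-- ===== PORT B =====
-- single pass with a fallback candidate (Source B's loop)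
def pvLoopB (target : String) : List (List (String × String)) → Option (List (String × String)) → List (String × String)
  | [], cand => cand.getD []
  | a :: rest, cand =>
      let norm := pvNormalise (PySem.Dict.getD (PySem.Dict.mk a) "link" "")
      if norm == target then a
      else pvLoopB target rest
        (if cand.isNone && (PySem.Str.isIn target norm || PySem.Str.isIn norm target)
         then some a else cand)

def find_source_article_alt (url : String) (articles : List (List (String × String))) : List (String × String) :=
  pvLoopB (pvNormalise url) articles none

-- ===== PRECONDITION & SPEC =====
-- A raises KeyError when it evaluates a["link"] on an article lacking the "link" key; excluded are exactly
-- those inputs: some article lacks "link" and no exact match occurs among the articles before it.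
def Pre_find_source_article (url : String) (articles : List (List (String × String))) : Prop :=
  (∀ a ∈ articles, PySem.Dict.contains (PySem.Dict.mk a) "link" = true) ∨
  ∃ a ∈ articles.takeWhile (fun a => PySem.Dict.contains (PySem.Dict.mk a) "link"),
    (pvNormalise (PySem.Dict.getD (PySem.Dict.mk a) "link" "") == pvNormalise url) = true
instance (url : String) (articles : List (List (String × String))) : Decidable (Pre_find_source_article url articles) := by unfold Pre_find_source_article; infer_instance

def pvWitness_find_source_article : String × (List (List (String × String))) :=
  ("http://x.com/a", [[("link", "http://x.com/a/")], [("link", "http://y.com")]])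

def Spec_find_source_article (url : String) (articles : List (List (String × String))) (out : List (String × String)) : Prop := out = find_source_article_alt url articles
instance (url : String) (articles : List (List (String × String))) (out : List (String × String)) : Decidable (Spec_find_source_article url articles out) := by unfold Spec_find_source_article; infer_instance

-- ===== CLAIM (what is proved, stated in full; the proofs are below) =====
def Claim_equal_find_source_article : Prop := ∀ (url : String) (articles : List (List (String × String))), Dom_find_source_article url articles → Pre_find_source_article url articles → Spec_find_source_article url articles (find_source_article url articles)

-- ===== LEMMAS AND PROOFS =====

-- the one-pass loop, characterised by the two scans of A
theorem pvLoopB_eq (target : String) (l : List (List (String × String)))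
    (cand : Option (List (String × String))) :
    pvLoopB target l cand =
      match pvFindExact target l with
      | some a => a
      | none =>
        match cand with
        | some c => c
        | none => (pvFindSub target l).getD [] := by
  induction l generalizing cand with
  | nil => cases cand <;> simp [pvLoopB, pvFindExact, pvFindSub]
  | cons a rest ih =>
    simp only [pvLoopB, pvFindExact, pvFindSub]
    cases he : (pvNormalise (PySem.Dict.getD (PySem.Dict.mk a) "link" "") == target) with
    | true => simp only [he, if_true]
    | false =>
      simp only [he, Bool.false_eq_true, if_false, ih]
      cases cand with
      | some c => rfl
      | none =>
        cases hs : (PySem.Str.isIn target (pvNormalise (PySem.Dict.getD (PySem.Dict.mk a) "link" "")) ||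
            PySem.Str.isIn (pvNormalise (PySem.Dict.getD (PySem.Dict.mk a) "link" "")) target) with
        | true =>
          simp only [Option.isNone_none, Bool.true_and, hs, if_true]
          cases pvFindExact target rest <;> rfl
        | false =>
          simp only [Option.isNone_none, Bool.true_and, hs, Bool.false_eq_true, if_false]

-- ===== VERDICT (by name: the statement is the Claim_ definition above) =====
theorem find_source_article_spec : Claim_equal_find_source_article := by
  intro url articles _ _
  unfold Spec_find_source_article
  simp only [find_source_article, find_source_article_alt]
  rw [pvLoopB_eq]
  cases h2 : pvFindExact (pvNormalise url) articles <;>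
    cases h : pvFindSub (pvNormalise url) articles <;> simp [h2, h]
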